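-- pv_equiv track=rewrite | github.com/Sainathplv/Leetcode | strings/alphabetsorderinstring.py | seqofalphainstrings
-- ===== SOURCE A (Python) =====
-- def seqofalphainstrings(s: str) -> str:
--     # Initialize an empty list to store alphabetic characters
--     alphabets_only = []
--
--     # Iterate through each character in the input string
--     for char in s:
--         if char.isalpha():
--             # Append the alphabetic character to the list in lowercase
--             alphabets_only.append(char.lower())
--
--     # Sort the alphabets in alphabetical order
--     sorted_alphabets = sorted(alphabets_only)
--
--     # Join the sorted alphabets into a single string
--     result = ''.join(sorted_alphabets)
--     return result
-- ===== SOURCE B (Python) =====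
-- def seqofalphainstrings(s: str) -> str:
--     # Counting sort over the 26 letters: one pass to count, then emit in order.
--     counts = [0] * 26
--     for ch in s:
--         if 'a' <= ch <= 'z':
--             counts[ord(ch) - 97] += 1
--         elif 'A' <= ch <= 'Z':
--             counts[ord(ch) - 65] += 1
--     out = []
--     for i in range(26):
--         out.append(chr(97 + i) * counts[i])
--     return ''.join(out)
-- ===== Notes on version B (the rewrite author's own statement) =====
-- stated objective: faster
-- what changed: Replaces filter+lower+comparison sort with a single counting pass over 26 letter buckets emitted in order (counting sort).
import Mathlib
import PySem

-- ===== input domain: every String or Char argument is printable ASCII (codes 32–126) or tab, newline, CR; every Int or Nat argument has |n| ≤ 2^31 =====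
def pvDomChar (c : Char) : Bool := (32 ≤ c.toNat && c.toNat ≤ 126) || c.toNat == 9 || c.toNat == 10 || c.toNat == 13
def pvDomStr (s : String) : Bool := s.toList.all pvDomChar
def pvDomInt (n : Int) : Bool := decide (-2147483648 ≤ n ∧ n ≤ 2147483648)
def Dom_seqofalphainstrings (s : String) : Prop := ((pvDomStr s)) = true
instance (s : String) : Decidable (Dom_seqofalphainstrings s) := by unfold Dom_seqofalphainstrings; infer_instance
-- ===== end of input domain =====

-- B replaces filter+lower+comparison sort with a counting sort over the 26 letter buckets (objective: faster).

-- ===== PORT A =====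
def seqofalphainstrings (s : String) : String :=
  let alphabets_only := s.toList.foldl
    (fun acc char => if PySem.Chars.isalpha char then acc ++ [PySem.Chars.lowerChar char] else acc) []
  let sorted_alphabets := PySem.List.sorted alphabets_only (fun x => x) false
  String.mk sorted_alphabets

-- ===== PORT B =====
-- one counting step of B's first loop
def pvStepB (counts : List Nat) (ch : Char) : List Nat :=
  if 'a' ≤ ch ∧ ch ≤ 'z' then counts.set (ch.toNat - 97) (counts[ch.toNat - 97]! + 1)
  else if 'A' ≤ ch ∧ ch ≤ 'Z' then counts.set (ch.toNat - 65) (counts[ch.toNat - 65]! + 1)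
  else counts

def seqofalphainstrings_alt (s : String) : String :=
  let counts := s.toList.foldl pvStepB (List.replicate 26 0)
  let out := (List.range 26).foldl
    (fun out i => out ++ [List.replicate counts[i]! (Char.ofNat (97 + i))]) []
  String.mk out.flatten

-- ===== PRECONDITION & SPEC =====
def Spec_seqofalphainstrings (s : String) (out : String) : Prop := out = seqofalphainstrings_alt s
instance (s : String) (out : String) : Decidable (Spec_seqofalphainstrings s out) := by unfold Spec_seqofalphainstrings; infer_instance

-- ===== CLAIM (what is proved, stated in full; the proofs are below) =====
def Claim_equal_seqofalphainstrings : Prop := ∀ (s : String), Dom_seqofalphainstrings s → Spec_seqofalphainstrings s (seqofalphainstrings s)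

-- ===== LEMMAS AND PROOFS =====

-- basic facts about set/getElem!/Char.ofNat used below
theorem pvSetSelf (l : List Nat) (i : Nat) (h : i < l.length) (v : Nat) : (l.set i v)[i]! = v := by
  rw [getElem!_pos _ _ (by simpa using h)]
  simp

theorem pvSetNe (l : List Nat) (i j : Nat) (hj : j < l.length) (h : i ≠ j) (v : Nat) : (l.set i v)[j]! = l[j]! := by
  rw [getElem!_pos (l.set i v) j (by simpa using hj), getElem!_pos l j hj]
  exact List.getElem_set_ne h _

theorem pvOfNat (n : Nat) (h : n < 55296) : (Char.ofNat n).toNat = n := by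
  have hv : Nat.isValidChar n := Or.inl h
  unfold Char.ofNat
  simp [hv, Char.ofNatAux, Char.toNat]

-- A's intermediate list, in closed form
def pvM (l : List Char) : List Char := (l.filter PySem.Chars.isalpha).map PySem.Chars.lowerChar

theorem pvStepB_length (counts : List Nat) (ch : Char) :
    (pvStepB counts ch).length = counts.length := by
  unfold pvStepB; split_ifs <;> simp

theorem pvFold_get (l : List Char) (counts : List Nat) (h : counts.length = 26)
    (i : Nat) (hi : i < 26) :
    (l.foldl pvStepB counts)[i]! = counts[i]! + (pvM l).count (Char.ofNat (97 + i)) := by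
  induction l generalizing counts with
  | nil => simp [pvM]
  | cons c l ih =>
    have hlen : (pvStepB counts c).length = 26 := by rw [pvStepB_length]; exact h
    rw [List.foldl_cons, ih _ hlen]
    have hM : pvM (c :: l) =
        (if PySem.Chars.isalpha c then [PySem.Chars.lowerChar c] else []) ++ pvM l := by
      unfold pvM
      by_cases hc : PySem.Chars.isalpha c = true <;> simp [hc]
    rw [hM]
    simp only [List.count_append]
    have hstep : (pvStepB counts c)[i]! =
        counts[i]! + (if PySem.Chars.isalpha c then [PySem.Chars.lowerChar c] else []).count
          (Char.ofNat (97 + i)) := by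
      unfold pvStepB
      by_cases h1 : 'a' ≤ c ∧ c ≤ 'z'
      · have ha : (97:Nat) ≤ c.toNat := h1.1
        have hz : c.toNat ≤ 122 := h1.2
        have hidx : c.toNat - 97 < 26 := by omega
        have hvalid : c.val.isValidChar := c.valid
        have hc' : Char.ofNat (97 + (c.toNat - 97)) = c := by
          have : 97 + (c.toNat - 97) = c.toNat := by omega
          rw [this]; exact Char.ofNat_toNat c
        have halpha : PySem.Chars.isalpha c = true := by
          simp [PySem.Chars.isalpha, PySem.Chars.islower, h1.1, h1.2]
        have hlowc : PySem.Chars.lowerChar c = c := by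
          have := h1.1
          simp only [PySem.Chars.lowerChar, PySem.Chars.isupper]
          have : ¬ (c ≤ 'Z') := by
            intro hle
            have : c.toNat ≤ 90 := hle
            omega
          simp [this]
        rw [if_pos h1]
        by_cases he : c.toNat - 97 = i
        · subst he
          rw [pvSetSelf _ _ (by omega)]
          simp [halpha, hlowc, hc']
        · rw [pvSetNe _ _ _ (by omega) he]
          have hne : PySem.Chars.lowerChar c ≠ Char.ofNat (97 + i) := by
            rw [hlowc]
            intro heq
            have : c.toNat = (Char.ofNat (97 + i)).toNat := by rw [heq]
            have hv : (Char.ofNat (97 + i)).toNat = 97 + i := by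
              exact pvOfNat _ (by omega)
            omega
          simp [halpha, hne]
      · rw [if_neg h1]
        by_cases h2 : 'A' ≤ c ∧ c ≤ 'Z'
        · have ha : (65:Nat) ≤ c.toNat := h2.1
          have hz : c.toNat ≤ 90 := h2.2
          have halpha : PySem.Chars.isalpha c = true := by
            simp [PySem.Chars.isalpha, PySem.Chars.isupper, h2.1, h2.2]
          have hup : PySem.Chars.isupper c = true := by
            simp [PySem.Chars.isupper, h2.1, h2.2]
          have hlowc : PySem.Chars.lowerChar c = Char.ofNat (c.toNat + 32) := by
            simp [PySem.Chars.lowerChar, hup]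
          have hlowNat : (PySem.Chars.lowerChar c).toNat = c.toNat + 32 := by
            rw [hlowc]; exact pvOfNat _ (by omega)
          rw [if_pos h2]
          by_cases he : c.toNat - 65 = i
          · subst he
            rw [pvSetSelf _ _ (by omega)]
            have heq : PySem.Chars.lowerChar c = Char.ofNat (97 + (c.toNat - 65)) := by
              rw [hlowc]
              congr 1
              omega
            simp [halpha, heq]
          · rw [pvSetNe _ _ _ (by omega) he]
            have hne : PySem.Chars.lowerChar c ≠ Char.ofNat (97 + i) := by
              intro heq
              have : (PySem.Chars.lowerChar c).toNat = (Char.ofNat (97 + i)).toNat := by rw [heq]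
              have hv : (Char.ofNat (97 + i)).toNat = 97 + i := by
                exact pvOfNat _ (by omega)
              omega
            simp [halpha, hne]
        · rw [if_neg h2]
          have halpha : PySem.Chars.isalpha c = false := by
            simp only [PySem.Chars.isalpha, PySem.Chars.islower, PySem.Chars.isupper]
            simp only [not_and_or] at h1 h2
            rcases h1 with h1 | h1 <;> rcases h2 with h2 | h2 <;> simp [h1, h2]
          simp [halpha]
    rw [hstep]
    omega

-- the final counts list: entry i holds (pvM l).count (letter i)
theorem pvCounts_get (l : List Char) (i : Nat) (hi : i < 26) :
    (l.foldl pvStepB (List.replicate 26 0))[i]! = (pvM l).count (Char.ofNat (97 + i)) := by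
  rw [pvFold_get l _ (by simp) i hi]
  have h0 : (List.replicate 26 (0:Nat))[i]! = 0 := by
    rw [getElem!_pos _ _ (by simpa using hi)]
    exact List.getElem_replicate _
  rw [h0]
  omega

-- every element of pvM l is a lowercase letter
theorem pvM_mem_range (l : List Char) (c : Char) (hc : c ∈ pvM l) :
    97 ≤ c.toNat ∧ c.toNat ≤ 122 := by
  unfold pvM at hc
  simp only [List.mem_map, List.mem_filter] at hc
  obtain ⟨x, ⟨_, hx⟩, rfl⟩ := hc
  simp only [PySem.Chars.isalpha, Bool.or_eq_true, PySem.Chars.isupper, PySem.Chars.islower,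
    Bool.and_eq_true, decide_eq_true_eq] at hx
  rcases hx with ⟨h1, h2⟩ | ⟨h1, h2⟩
  · have h1' : (65:Nat) ≤ x.toNat := h1
    have h2' : x.toNat ≤ 90 := h2
    have hup : PySem.Chars.isupper x = true := by simp [PySem.Chars.isupper, h1, h2]
    simp only [PySem.Chars.lowerChar, hup, if_true]
    have : (Char.ofNat (x.toNat + 32)).toNat = x.toNat + 32 := by
      exact pvOfNat _ (by omega)
    omega
  · have h1' : (97:Nat) ≤ x.toNat := h1
    have h2' : x.toNat ≤ 122 := h2
    have hup : PySem.Chars.isupper x = false := by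
      simp only [PySem.Chars.isupper, Bool.and_eq_false_iff, decide_eq_false_iff_not]
      right
      intro hle
      have : x.toNat ≤ 90 := hle
      omega
    simp [PySem.Chars.lowerChar, hup]
    omega

-- B's emitted character list, in closed form
def pvO (l : List Char) : List Char :=
  (List.range 26).flatMap (fun i => List.replicate ((pvM l).count (Char.ofNat (97 + i))) (Char.ofNat (97 + i)))

theorem pvSumIte (n i₀ : Nat) (v : Nat) (h : i₀ < n) :
    ((List.range n).map (fun i => if i = i₀ then v else 0)).sum = v := by
  induction n with
  | zero => omega
  | succ n ih =>
    rw [List.range_succ, List.map_append, List.sum_append]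
    by_cases hc : i₀ < n
    · rw [ih hc]
      simp
      omega
    · have he : i₀ = n := by omega
      subst he
      have : ∀ i ∈ List.range i₀, (if i = i₀ then v else 0) = 0 := by
        intro i hi
        simp only [List.mem_range] at hi
        simp
        omega
      rw [List.map_congr_left this]
      simp

theorem pvO_perm (l : List Char) : (pvO l).Perm (pvM l) := by
  rw [List.perm_iff_count]
  intro a
  unfold pvO
  rw [List.count_flatMap]
  simp only [Function.comp_def]
  by_cases ha : 97 ≤ a.toNat ∧ a.toNat ≤ 122
  · -- exactly the bucket i₀ = a.toNat - 97 contributes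
    set i₀ := a.toNat - 97 with hi₀
    have ha' : Char.ofNat (97 + i₀) = a := by
      have : 97 + i₀ = a.toNat := by omega
      rw [this]; exact Char.ofNat_toNat a
    have hcount : ∀ i ∈ List.range 26,
        (List.replicate ((pvM l).count (Char.ofNat (97 + i))) (Char.ofNat (97 + i))).count a
          = if i = i₀ then (pvM l).count a else 0 := by
      intro i hi
      simp only [List.mem_range] at hi
      by_cases he : i = i₀
      · subst he; simp [ha']
      · have hne : Char.ofNat (97 + i) ≠ a := by
          intro heq
          have : (Char.ofNat (97 + i)).toNat = a.toNat := by rw [heq]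
          have hv : (Char.ofNat (97 + i)).toNat = 97 + i := by
            exact pvOfNat _ (by omega)
          omega
        simp [List.count_replicate, hne, he]
    rw [List.map_congr_left hcount]
    exact pvSumIte 26 i₀ _ (by omega)
  · -- a is not a lowercase letter: both counts are 0
    have h1 : (pvM l).count a = 0 := by
      rw [List.count_eq_zero]
      intro hmem
      exact ha (pvM_mem_range l a hmem)
    rw [h1]
    have : ∀ i ∈ List.range 26,
        (List.replicate ((pvM l).count (Char.ofNat (97 + i))) (Char.ofNat (97 + i))).count a = 0 := by
      intro i hi
      simp only [List.mem_range] at hi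
      have hne : Char.ofNat (97 + i) ≠ a := by
        intro heq
        have : (Char.ofNat (97 + i)).toNat = a.toNat := by rw [heq]
        have hv : (Char.ofNat (97 + i)).toNat = 97 + i := by
          exact pvOfNat _ (by omega)
        omega
      simp [List.count_replicate, hne]
    rw [List.map_congr_left this]
    simp

theorem pvO_pairwise (l : List Char) : (pvO l).Pairwise (· ≤ ·) := by
  unfold pvO
  rw [List.flatMap_def, List.pairwise_flatten]
  refine ⟨?_, ?_⟩
  · intro lst hlst
    simp only [List.mem_map, List.mem_range] at hlst
    obtain ⟨i, _, rfl⟩ := hlst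
    exact List.pairwise_replicate.mpr (Or.inr le_rfl)
  · rw [List.pairwise_map]
    apply List.Pairwise.imp_of_mem ?_ (List.pairwise_lt_range (n := 26))
    intro i j hi hj hij
    simp only [List.mem_range] at hi hj
    intro x hx y hy
    rw [List.eq_of_mem_replicate hx, List.eq_of_mem_replicate hy]
    have hvi : (Char.ofNat (97 + i)).toNat = 97 + i := by exact pvOfNat _ (by omega)
    have hvj : (Char.ofNat (97 + j)).toNat = 97 + j := by exact pvOfNat _ (by omega)
    show (Char.ofNat (97 + i)) ≤ (Char.ofNat (97 + j))
    have : (Char.ofNat (97 + i)).toNat ≤ (Char.ofNat (97 + j)).toNat := by omega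
    exact this

theorem pvSorted_eq (l : List Char) :
    PySem.List.sorted (pvM l) (fun x => x) false = pvO l :=
  PySem.List.sorted_id_eq_of_perm_of_pairwise _ _ (pvO_perm l) (pvO_pairwise l)

-- ===== VERDICT (by name: the statement is the Claim_ definition above) =====
set_option maxHeartbeats 1000000 in
theorem seqofalphainstrings_spec : Claim_equal_seqofalphainstrings := by
  intro s _
  unfold Spec_seqofalphainstrings seqofalphainstrings seqofalphainstrings_alt
  simp only [PySem.List.foldl_append_if, List.nil_append]
  rw [show ((s.toList.filter PySem.Chars.isalpha).map PySem.Chars.lowerChar) = pvM s.toList from rfl]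
  rw [pvSorted_eq]
  rw [PySem.List.foldl_append_singleton_eq_map, List.nil_append, List.flatten_eq_flatMap]
  unfold pvO
  congr 1
  rw [List.flatMap_map, List.flatMap_def, List.flatMap_def]
  congr 1
  apply List.map_congr_left
  intro i hi
  simp only [List.mem_range] at hi
  rw [pvCounts_get s.toList i hi]
  rfl
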